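-- pv_equiv track=rewrite | github.com/Shahbazi-Amir/Kavir_RAG | src/ingestion_stream.py | chunk_text_stream
-- ===== SOURCE A (Python) =====
-- from typing import Iterator, Union, List
--
-- def chunk_text_stream(
--     text_iter: Iterator[str],
--     size: int = 800,
--     overlap: int = 150
-- ) -> Iterator[str]:
--     if size <= 0 or not (0 <= overlap < size):
--         raise ValueError("invalid chunk params")
--     step = max(1, size - overlap)
--     for text in text_iter:
--         n = len(text)
--         start = 0
--         while start < n:
--             end = min(start + size, n)
--             yield text[start:end]
--             if end >= n:
--                 break
--             start += step
-- ===== SOURCE B (Python) =====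
-- def chunk_text_stream(text_iter, size=800, overlap=150):
--     if size <= 0 or not (0 <= overlap < size):
--         raise ValueError("invalid chunk params")
--     step = max(1, size - overlap)
--     for text in text_iter:
--         rest = text
--         while len(rest) > size:
--             yield rest[:size]
--             rest = rest[step:]
--         if rest:
--             yield rest
-- ===== Notes on version B (the rewrite author's own statement) =====
-- stated objective: alternative
-- what changed: B keeps no indices at all: per text it repeatedly peels the size-long prefix off a shrinking remainder string (rest = rest[step:]) and emits the final short remainder after the loop, instead of A's index walk with min(start+size,n) and an end>=n break; it trades extra suffix copying for the plainer state.
import Mathlib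
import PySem

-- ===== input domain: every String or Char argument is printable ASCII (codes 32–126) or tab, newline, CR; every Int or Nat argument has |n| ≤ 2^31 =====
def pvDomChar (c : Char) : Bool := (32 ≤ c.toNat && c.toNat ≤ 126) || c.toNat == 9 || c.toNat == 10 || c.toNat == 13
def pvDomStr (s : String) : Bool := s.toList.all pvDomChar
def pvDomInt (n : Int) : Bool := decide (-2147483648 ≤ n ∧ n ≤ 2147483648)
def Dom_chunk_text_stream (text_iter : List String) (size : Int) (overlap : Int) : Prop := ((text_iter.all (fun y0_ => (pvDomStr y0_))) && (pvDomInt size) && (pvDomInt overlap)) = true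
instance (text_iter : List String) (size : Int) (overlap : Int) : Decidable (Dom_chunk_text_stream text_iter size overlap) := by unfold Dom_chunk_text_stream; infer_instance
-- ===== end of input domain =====

-- ===== PORT A =====
-- B maintains a shrinking remainder string per text (no indices); A walks indices with a break.
-- A's while-loop: emit text[start:min(start+size,n)], stop when the chunk reaches the end, else advance by step.
def pvALoop (t : String) (size step : Int) (hstep : 1 ≤ step) (n start : Int) : List String :=
  if _h : start < n then
    if n ≤ min (start + size) n then [PySem.Str.slice t (some start) (some (min (start + size) n))]
    else PySem.Str.slice t (some start) (some (min (start + size) n)) :: pvALoop t size step hstep n (start + step)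
  else []
termination_by (n - start).toNat
decreasing_by omega

def chunk_text_stream (text_iter : List String) (size : Int) (overlap : Int) : List String :=
  let step := max 1 (size - overlap)
  text_iter.flatMap (fun t => pvALoop t size step (le_max_left 1 (size - overlap)) (PySem.Str.len t) 0)

-- ===== PORT B =====
-- Source B's inner while: while len(rest) > size: yield rest[:size]; rest = rest[step:]; then if rest: yield rest.
-- The dite guard (0 < step, 0 ≤ size) only makes the recursion total; on inputs passing A's validation it always holds.
def pvBLoop (rest : String) (size step : Int) : List String :=
  if _h : 0 < step ∧ 0 ≤ size ∧ size < PySem.Str.len rest then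
    PySem.Str.slice rest none (some size) :: pvBLoop (PySem.Str.slice rest (some step) none) size step
  else if PySem.Str.len rest ≠ 0 then [rest] else []
termination_by (PySem.Str.len rest).toNat
decreasing_by
  simp only [PySem.Str.len_eq, PySem.Str.toList_slice, PySem.Chars.slice_eq_listSlice] at *
  rw [PySem.List.slice_from _ (by omega : (0:Int) ≤ step)]
  simp only [List.length_drop]
  omega

def chunk_text_stream_alt (text_iter : List String) (size : Int) (overlap : Int) : List String :=
  let step := max 1 (size - overlap)
  text_iter.flatMap (fun t => pvBLoop t size step)

-- ===== PRECONDITION & SPEC =====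
-- Pre_ excludes exactly the inputs on which A raises ValueError: size <= 0 or overlap outside [0, size).
def Pre_chunk_text_stream (text_iter : List String) (size : Int) (overlap : Int) : Prop :=
  0 < size ∧ 0 ≤ overlap ∧ overlap < size

instance (text_iter : List String) (size : Int) (overlap : Int) : Decidable (Pre_chunk_text_stream text_iter size overlap) := by unfold Pre_chunk_text_stream; infer_instance

def pvWitness_chunk_text_stream : List String × Int × Int := (["hello world", "", "ab"], 4, 1)

def Spec_chunk_text_stream (text_iter : List String) (size : Int) (overlap : Int) (out : List String) : Prop := out = chunk_text_stream_alt text_iter size overlap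
instance (text_iter : List String) (size : Int) (overlap : Int) (out : List String) : Decidable (Spec_chunk_text_stream text_iter size overlap out) := by unfold Spec_chunk_text_stream; infer_instance

-- ===== CLAIM (what is proved, stated in full; the proofs are below) =====
def Claim_equal_chunk_text_stream : Prop := ∀ (text_iter : List String) (size : Int) (overlap : Int), Dom_chunk_text_stream text_iter size overlap → Pre_chunk_text_stream text_iter size overlap → Spec_chunk_text_stream text_iter size overlap (chunk_text_stream text_iter size overlap)

-- ===== LEMMAS AND PROOFS =====

-- A's loop at index `start` equals B's loop on the suffix text[start:].
lemma pvLoops_eq (t : String) (size step : Int) (hstep : 1 ≤ step) (hsz : 0 < size) :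
    ∀ (k : Nat) (start : Int), ((PySem.Str.len t) - start).toNat ≤ k → 0 ≤ start →
      pvALoop t size step hstep (PySem.Str.len t) start =
        pvBLoop (PySem.Str.slice t (some start) none) size step := by
  intro k
  induction k with
  | zero =>
    intro start hk h0
    have hn : (PySem.Str.len t) ≤ start := by omega
    rw [pvALoop, dif_neg (by omega)]
    rw [pvBLoop.eq_def]
    have hlen : PySem.Str.len (PySem.Str.slice t (some start) none) = 0 := by
      simp only [PySem.Str.len_eq, PySem.Str.toList_slice, PySem.Chars.slice_eq_listSlice]
      rw [PySem.List.slice_from _ h0]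
      simp only [List.length_drop, Nat.cast_eq_zero]
      simp only [PySem.Str.len_eq] at hn
      omega
    rw [dif_neg (by rw [hlen]; omega)]
    rw [if_neg (by rw [hlen]; omega)]
  | succ k ih =>
    intro start hk h0
    set n := PySem.Str.len t with hndef
    have hn0 : 0 ≤ n := by simp [hndef, PySem.Str.len_eq]
    have hlen : PySem.Str.len (PySem.Str.slice t (some start) none) = n - start ∨
        (PySem.Str.len (PySem.Str.slice t (some start) none) = 0 ∧ n ≤ start) := by
      simp only [PySem.Str.len_eq, PySem.Str.toList_slice, PySem.Chars.slice_eq_listSlice]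
      rw [PySem.List.slice_from _ h0]
      simp only [List.length_drop]
      simp only [hndef, PySem.Str.len_eq]
      omega
    by_cases hlt : start < n
    · have hrest : PySem.Str.len (PySem.Str.slice t (some start) none) = n - start := by
        rcases hlen with h | ⟨_, h⟩
        · exact h
        · omega
      rw [pvALoop, dif_pos hlt, pvBLoop.eq_def]
      by_cases hend : n ≤ start + size
      · -- last chunk: A emits text[start:n] and stops; B's guard fails, remainder nonempty
        rw [if_pos (by omega : n ≤ min (start + size) n)]
        rw [dif_neg (by rw [hrest]; omega)]
        rw [if_pos (by rw [hrest]; omega)]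
        have : PySem.Str.slice t (some start) (some (min (start + size) n)) =
            PySem.Str.slice t (some start) none := by
          apply String.toList_inj.mp
          simp only [PySem.Str.toList_slice, PySem.Chars.slice_eq_listSlice]
          rw [PySem.List.slice_from _ h0,
              PySem.List.slice_toNat _ h0 (by omega : (0:Int) ≤ min (start + size) n)]
          have hmin : (min (start + size) n) = n := by omega
          rw [hmin]
          rw [List.take_of_length_le (by simp only [List.length_drop]; simp only [hndef, PySem.Str.len_eq] at *; omega)]
        rw [this]
      · -- middle chunk: both emit text[start:start+size] and continue
        rw [if_neg (by omega : ¬ n ≤ min (start + size) n)]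
        rw [dif_pos ⟨by omega, by omega, by rw [hrest]; omega⟩]
        have hchunk : PySem.Str.slice t (some start) (some (min (start + size) n)) =
            PySem.Str.slice (PySem.Str.slice t (some start) none) none (some size) := by
          apply String.toList_inj.mp
          simp only [PySem.Str.toList_slice, PySem.Chars.slice_eq_listSlice]
          rw [PySem.List.slice_from _ h0, PySem.List.slice_to _ (by omega : (0:Int) ≤ size),
              PySem.List.slice_toNat _ h0 (by omega : (0:Int) ≤ min (start + size) n)]
          have hmin : min (start + size) n = start + size := by omega
          rw [hmin]
          congr 1
          omega
        have hrest2 : PySem.Str.slice (PySem.Str.slice t (some start) none) (some step) none =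
            PySem.Str.slice t (some (start + step)) none := by
          apply String.toList_inj.mp
          simp only [PySem.Str.toList_slice, PySem.Chars.slice_eq_listSlice]
          rw [PySem.List.slice_from _ h0, PySem.List.slice_from _ (by omega : (0:Int) ≤ step),
              PySem.List.slice_from _ (by omega : (0:Int) ≤ start + step), List.drop_drop]
          congr 1
          omega
        rw [hchunk, hrest2, ih (start + step) (by omega) (by omega)]
    · -- start past the end: both empty
      rw [pvALoop, dif_neg hlt, pvBLoop.eq_def]
      have hz : PySem.Str.len (PySem.Str.slice t (some start) none) = 0 := by
        have hge : 0 ≤ PySem.Str.len (PySem.Str.slice t (some start) none) := by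
          simp [PySem.Str.len_eq]
        rcases hlen with h | ⟨h, _⟩
        · omega
        · exact h
      rw [dif_neg (by rw [hz]; omega), if_neg (by rw [hz]; omega)]

-- ===== VERDICT (by name: the statement is the Claim_ definition above) =====
theorem chunk_text_stream_spec : Claim_equal_chunk_text_stream := by
  intro text_iter size overlap _hdom hpre
  obtain ⟨hsz, hov0, hov⟩ := hpre
  unfold Spec_chunk_text_stream chunk_text_stream chunk_text_stream_alt
  simp only
  apply List.flatMap_congr
  intro t _
  rw [pvLoops_eq t size (max 1 (size - overlap)) (le_max_left _ _) hsz
        ((PySem.Str.len t) - 0).toNat 0 (le_refl _) (le_refl 0)]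
  congr 1
  apply String.toList_inj.mp
  simp only [PySem.Str.toList_slice, PySem.Chars.slice_eq_listSlice]
  rw [PySem.List.slice_from _ (le_refl (0:Int))]
  simp
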